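-- pv_equiv track=rewrite | github.com/VIB-PSB/sc_wheat_root_atlas | GRN_regulon_analysis/bin/cross_species_regulon_overlap.py | convert_to_tissues
-- ===== SOURCE A (Python) =====
-- def convert_to_tissues(species2cluster2genes_and_groups, correspondance_dict):
--
--     """
--     Convert the clusters of different species into one tissue (i.e. cell type), merging the genes and orthogroups
--     of different clusters of the same tissue together.
--
--     Parameters:
--         species2cluster2genes_and_groups (dict): A nested dictionary where the outer keys are species names, the middle keys
--                                                  are cluster names, and the innermost keys are "genes" and "groups" mapping
--                                                  to sets of genes and orthogroups respectively.
--         correspondance_dict (dict): A dictionary mapping tissues to species and their corresponding clusters.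
--                                     The keys are tissue names, and values are dictionaries with species names as keys
--                                     and lists of cluster names as values.
--
--     Returns:
--         dict: A nested dictionary where the outer keys are species names, the middle keys are tissue names,
--               and the innermost keys are "genes" and "groups" mapping to sets of genes and orthogroups respectively.
--
--     """
--
--     # Initialize the dictionary to store genes and orthogroups grouped by tissue
--     species2tissue2genes_and_groups = dict()
--
--     # Loop over all the species and tissues
--     for species, cluster2genes_and_groups in species2cluster2genes_and_groups.items():
--         species2tissue2genes_and_groups[species] = dict()
--         for tissue in correspondance_dict:
--             species2tissue2genes_and_groups[species][tissue] = dict()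
--
--             # Gather the genes or groups of all clusters of this tissue
--             for genes_or_group in ["genes", "groups"]:
--                 id_set = set()
--                 for cluster in correspondance_dict[tissue][species]:
--                     if (cluster == "") or (cluster not in cluster2genes_and_groups.keys()):
--                         pass # Skip if there is no cluster annotated to this tissue in this species
--                     else:
--                         id_set.update(cluster2genes_and_groups[cluster][genes_or_group])
--
--                 # Add the merged gene or group IDs to the final dict
--                 species2tissue2genes_and_groups[species][tissue][genes_or_group] = id_set
--
--     return species2tissue2genes_and_groups
-- ===== SOURCE B (Python) =====
-- def convert_to_tissues(species2cluster2genes_and_groups, correspondance_dict):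
--     """Two-stage pipeline: stage 1 flattens the whole input into one tagged
--     record stream [((species, tissue, kind), id), ...]; stage 2 builds the
--     nested output shape and fills each cell by selecting its ids from the
--     stream.  No in-place dict mutation or incremental set.update."""
--     records = [((sp, t, kind), x)
--                for sp, c2gg in species2cluster2genes_and_groups.items()
--                for t, sp2clusters in correspondance_dict.items()
--                for kind in ("genes", "groups")
--                for c in sp2clusters[sp]
--                if c != "" and c in c2gg
--                for x in c2gg[c][kind]]
--     return {sp: {t: {kind: {x for tag, x in records if tag == (sp, t, kind)}
--                      for kind in ("genes", "groups")}
--                  for t in correspondance_dict}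
--             for sp in species2cluster2genes_and_groups}
-- ===== Notes on version B (the rewrite author's own statement) =====
-- stated objective: alternative
-- what changed: A fills nested dicts in place, unioning each cluster's ids into a growing set inside four nested loops; B is a two-stage pipeline: it first flattens the whole input into one flat tagged record stream [((species,tissue,kind), id), ...] and then builds the output shape, filling each cell by selecting its ids from that stream.
import Mathlib
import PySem

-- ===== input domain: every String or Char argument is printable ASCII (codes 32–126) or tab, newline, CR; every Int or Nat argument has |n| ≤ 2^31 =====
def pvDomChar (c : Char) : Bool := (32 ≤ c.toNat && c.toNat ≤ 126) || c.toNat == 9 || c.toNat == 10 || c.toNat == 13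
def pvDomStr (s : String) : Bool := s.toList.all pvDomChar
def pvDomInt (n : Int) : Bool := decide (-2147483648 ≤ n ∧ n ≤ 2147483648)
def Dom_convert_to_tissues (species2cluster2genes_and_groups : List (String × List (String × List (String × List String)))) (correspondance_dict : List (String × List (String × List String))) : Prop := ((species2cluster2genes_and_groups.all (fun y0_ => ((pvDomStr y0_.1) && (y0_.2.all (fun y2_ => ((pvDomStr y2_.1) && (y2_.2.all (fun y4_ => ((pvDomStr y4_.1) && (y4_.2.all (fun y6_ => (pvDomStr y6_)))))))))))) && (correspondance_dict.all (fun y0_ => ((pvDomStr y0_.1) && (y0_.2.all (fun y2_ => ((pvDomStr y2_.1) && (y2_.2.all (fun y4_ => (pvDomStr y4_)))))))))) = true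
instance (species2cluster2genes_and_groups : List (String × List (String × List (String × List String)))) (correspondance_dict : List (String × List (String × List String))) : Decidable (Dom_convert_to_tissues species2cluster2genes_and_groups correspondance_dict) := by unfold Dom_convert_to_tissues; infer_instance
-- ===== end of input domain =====

-- B replaces A's in-place nested accumulation by a two-stage pipeline (flatten the input into one
-- tagged record stream, then fill each output cell by selecting its ids from the stream); same
-- return value, not faster (each cell rescans the stream).

-- ===== PORT A =====
def convert_to_tissues (species2cluster2genes_and_groups : List (String × List (String × List (String × List String)))) (correspondance_dict : List (String × List (String × List String))) : List (String × List (String × List (String × List String))) :=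
  ((species2cluster2genes_and_groups.foldl (init := (PySem.Dict.empty : PySem.Dict String (PySem.Dict String (PySem.Dict String (PySem.Set String))))) (fun s2t p =>
    s2t.insert p.1
      (correspondance_dict.foldl (init := PySem.Dict.empty) (fun t2 q =>
        t2.insert q.1
          ((["genes", "groups"]).foldl (init := PySem.Dict.empty) (fun kd kind =>
            kd.insert kind
              ((PySem.Dict.getD (PySem.Dict.mk q.2) p.1 []).foldl (init := PySem.Set.empty) (fun s c =>
                if c == "" || !((PySem.Dict.mk p.2).contains c) then s
                else PySem.Set.update s (PySem.Dict.getD (PySem.Dict.mk (PySem.Dict.getD (PySem.Dict.mk p.2) c [])) kind [])))))))))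
  ).items.map (fun r => (r.1, r.2.items.map (fun t => (t.1, t.2.items))))

-- ===== PORT B =====
-- B-side helper: stage 1 of Source B, the flat tagged record stream [((species, tissue, kind), id), ...]
def pvRecords (species2cluster2genes_and_groups : List (String × List (String × List (String × List String)))) (correspondance_dict : List (String × List (String × List String))) : List ((String × String × String) × String) :=
  species2cluster2genes_and_groups.flatMap fun p =>
    correspondance_dict.flatMap fun q =>
      (["genes", "groups"]).flatMap fun kind =>
        (PySem.Dict.getD (PySem.Dict.mk q.2) p.1 []).flatMap fun c =>
          if !(c == "") && (PySem.Dict.mk p.2).contains c then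
            (PySem.Dict.getD (PySem.Dict.mk (PySem.Dict.getD (PySem.Dict.mk p.2) c [])) kind []).map fun x => ((p.1, q.1, kind), x)
          else []

def convert_to_tissues_alt (species2cluster2genes_and_groups : List (String × List (String × List (String × List String)))) (correspondance_dict : List (String × List (String × List String))) : List (String × List (String × List (String × List String))) :=
  let records := pvRecords species2cluster2genes_and_groups correspondance_dict
  species2cluster2genes_and_groups.map fun p =>
    (p.1, correspondance_dict.map fun q =>
      (q.1, (["genes", "groups"]).map fun kind =>
        (kind, PySem.Set.ofList ((records.filter fun r => r.1 == (p.1, q.1, kind)).map Prod.snd))))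

-- ===== PRECONDITION & SPEC =====
-- Pre_ excludes (a) association lists with duplicate species/tissue keys, which no Python dict can
-- contain (unreachable representations under the type convention), and (b) inputs where Python
-- raises KeyError: a tissue's dict missing a species, or a used cluster's dict missing the
-- "genes" or "groups" key.
def Pre_convert_to_tissues (species2cluster2genes_and_groups : List (String × List (String × List (String × List String)))) (correspondance_dict : List (String × List (String × List String))) : Prop :=
  (species2cluster2genes_and_groups.map Prod.fst).Nodup ∧
  (correspondance_dict.map Prod.fst).Nodup ∧
  ∀ p ∈ species2cluster2genes_and_groups, ∀ q ∈ correspondance_dict,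
    (PySem.Dict.contains (PySem.Dict.mk q.2) p.1 = true) ∧
    ∀ c ∈ PySem.Dict.getD (PySem.Dict.mk q.2) p.1 ([] : List String),
      c ≠ "" → PySem.Dict.contains (PySem.Dict.mk p.2) c = true →
        PySem.Dict.contains (PySem.Dict.mk (PySem.Dict.getD (PySem.Dict.mk p.2) c [])) "genes" = true ∧
        PySem.Dict.contains (PySem.Dict.mk (PySem.Dict.getD (PySem.Dict.mk p.2) c [])) "groups" = true
instance (species2cluster2genes_and_groups : List (String × List (String × List (String × List String)))) (correspondance_dict : List (String × List (String × List String))) : Decidable (Pre_convert_to_tissues species2cluster2genes_and_groups correspondance_dict) := by unfold Pre_convert_to_tissues; infer_instance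

def pvWitness_convert_to_tissues : (List (String × List (String × List (String × List String)))) × (List (String × List (String × List String))) :=
  ([("wheat", [("c1", [("genes", ["g1", "g2"]), ("groups", ["og1"])]),
               ("c2", [("genes", ["g2", "g3"]), ("groups", ["og2"])])])],
   [("root", [("wheat", ["c1", "c2", ""])]), ("leaf", [("wheat", ["missing"])])])

def Spec_convert_to_tissues (species2cluster2genes_and_groups : List (String × List (String × List (String × List String)))) (correspondance_dict : List (String × List (String × List String))) (out : List (String × List (String × List (String × List String)))) : Prop := out = convert_to_tissues_alt species2cluster2genes_and_groups correspondance_dict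
instance (species2cluster2genes_and_groups : List (String × List (String × List (String × List String)))) (correspondance_dict : List (String × List (String × List String))) (out : List (String × List (String × List (String × List String)))) : Decidable (Spec_convert_to_tissues species2cluster2genes_and_groups correspondance_dict out) := by unfold Spec_convert_to_tissues; infer_instance

-- ===== CLAIM =====
def Claim_equal_convert_to_tissues : Prop := ∀ (species2cluster2genes_and_groups : List (String × List (String × List (String × List String)))) (correspondance_dict : List (String × List (String × List String))), Dom_convert_to_tissues species2cluster2genes_and_groups correspondance_dict → Pre_convert_to_tissues species2cluster2genes_and_groups correspondance_dict → Spec_convert_to_tissues species2cluster2genes_and_groups correspondance_dict (convert_to_tissues species2cluster2genes_and_groups correspondance_dict)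

-- ===== LEMMAS AND PROOFS =====

-- A's skip-or-update set loop over the raw cluster list equals ofList of the flattened contributions.
theorem set_loop_eq (clusters : List String) (c2g : PySem.Dict String (List (String × List String))) (kind : String) (s : PySem.Set String) :
    clusters.foldl (fun s c =>
        if c == "" || !(c2g.contains c) then s
        else PySem.Set.update s (PySem.Dict.getD (PySem.Dict.mk (PySem.Dict.getD c2g c [])) kind [])) s
      = PySem.Set.update s (clusters.flatMap
          fun c => if !(c == "") && c2g.contains c then PySem.Dict.getD (PySem.Dict.mk (PySem.Dict.getD c2g c [])) kind [] else []) := by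
  induction clusters generalizing s with
  | nil => simp [PySem.Set.update]
  | cons c cs ih =>
    rw [List.foldl_cons, List.flatMap_cons]
    by_cases h : (c == "" || !(c2g.contains c)) = true
    · have h' : (!(c == "") && c2g.contains c) = false := by
        cases hc : (c == "") <;> cases hg : c2g.contains c <;> simp_all
      rw [if_pos h, if_neg (by simp [h']), List.nil_append, ih]
    · have h' : (!(c == "") && c2g.contains c) = true := by
        cases hc : (c == "") <;> cases hg : c2g.contains c <;> simp_all
      rw [if_neg h, if_pos (by simp [h']), ih, PySem.Set.update_append]

-- the two-entry kind dict A builds has exactly this literal item list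
theorem kind_items (g r : PySem.Set String) :
    (PySem.Dict.items (((PySem.Dict.empty : PySem.Dict String (PySem.Set String)).insert "genes" g).insert "groups" r))
      = [("genes", g), ("groups", r)] := by
  rfl

-- an if whose condition does not depend on the element pulls out of a flatMap
theorem flatMap_if {α γ : Type} (P : Prop) [Decidable P] (l : List α) (f : α → List γ) :
    (l.flatMap fun a => if P then f a else []) = if P then l.flatMap f else [] := by
  split <;> simp

-- on an association list with distinct keys, the flatMap keeps exactly the segment of the matching key
theorem pvPick {β γ : Type} (l : List (String × β)) (h : (l.map Prod.fst).Nodup) (p : String × β)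
    (hp : p ∈ l) (g : String × β → List γ) :
    (l.flatMap fun p' => if p'.1 = p.1 then g p' else []) = g p := by
  induction l with
  | nil => cases hp
  | cons a l ih =>
    have h' : a.1 ∉ l.map Prod.fst ∧ (l.map Prod.fst).Nodup := by
      rw [List.map_cons] at h; exact List.nodup_cons.1 h
    rw [List.flatMap_cons]
    rcases List.mem_cons.1 hp with rfl | hp'
    · rw [if_pos rfl]
      have hz : (l.flatMap fun p' => if p'.1 = p.1 then g p' else []) = [] := by
        apply List.flatMap_eq_nil_iff.2
        intro p' hp''
        have hne : p'.1 ≠ p.1 := by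
          intro e; exact h'.1 (e ▸ List.mem_map_of_mem hp'')
        simp [hne]
      rw [hz, List.append_nil]

    · have hne : a.1 ≠ p.1 := by
        intro e; exact h'.1 (e ▸ List.mem_map_of_mem hp')
      rw [if_neg hne, List.nil_append]
      exact ih h'.2 hp'

-- filtering the record stream by a cell's tag recovers exactly that cell's flattened contributions
theorem filter_records (s2c : List (String × List (String × List (String × List String)))) (corr : List (String × List (String × List String)))
    (h1 : (s2c.map Prod.fst).Nodup) (h2 : (corr.map Prod.fst).Nodup)
    (p : String × List (String × List (String × List String))) (hp : p ∈ s2c)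
    (q : String × List (String × List String)) (hq : q ∈ corr)
    (kind : String) (hk : kind = "genes" ∨ kind = "groups") :
    ((pvRecords s2c corr).filter fun r => r.1 == (p.1, q.1, kind)).map Prod.snd
      = (PySem.Dict.getD (PySem.Dict.mk q.2) p.1 []).flatMap (fun c =>
          if !(c == "") && (PySem.Dict.mk p.2).contains c then
            PySem.Dict.getD (PySem.Dict.mk (PySem.Dict.getD (PySem.Dict.mk p.2) c [])) kind []
          else []) := by
  unfold pvRecords
  -- push the filter through the four nested flatMaps
  simp only [List.filter_flatMap]
  -- resolve the innermost filter: it keeps a record iff its tag is the target tag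
  have hinner : ∀ (p' : String × List (String × List (String × List String)))
      (q' : String × List (String × List String)) (kind' c : String),
      ((if !(c == "") && (PySem.Dict.mk p'.2).contains c then
          (PySem.Dict.getD (PySem.Dict.mk (PySem.Dict.getD (PySem.Dict.mk p'.2) c [])) kind' []).map fun x => ((p'.1, q'.1, kind'), x)
        else []).filter fun r => r.1 == (p.1, q.1, kind))
      = if p'.1 = p.1 then if q'.1 = q.1 then if kind' = kind then
          (if !(c == "") && (PySem.Dict.mk p'.2).contains c then
            (PySem.Dict.getD (PySem.Dict.mk (PySem.Dict.getD (PySem.Dict.mk p'.2) c [])) kind' []).map fun x => ((p'.1, q'.1, kind'), x)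
          else [])
        else [] else [] else [] := by
    intro p' q' kind' c
    by_cases e1 : p'.1 = p.1 <;> by_cases e2 : q'.1 = q.1 <;> by_cases e3 : kind' = kind <;>
      split <;> simp_all [List.filter_map, Function.comp_def]
  have hout : (s2c.flatMap fun p' => corr.flatMap fun q' => (["genes", "groups"] : List String).flatMap fun kind' =>
        (PySem.Dict.getD (PySem.Dict.mk q'.2) p'.1 []).flatMap fun c =>
          ((if !(c == "") && (PySem.Dict.mk p'.2).contains c then
            (PySem.Dict.getD (PySem.Dict.mk (PySem.Dict.getD (PySem.Dict.mk p'.2) c [])) kind' []).map fun x => ((p'.1, q'.1, kind'), x)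
          else []).filter fun r => r.1 == (p.1, q.1, kind)))
      = (s2c.flatMap fun p' => if p'.1 = p.1 then (corr.flatMap fun q' => if q'.1 = q.1 then
          ((["genes", "groups"] : List String).flatMap fun kind' => if kind' = kind then
            ((PySem.Dict.getD (PySem.Dict.mk q'.2) p'.1 []).flatMap fun c =>
              (if !(c == "") && (PySem.Dict.mk p'.2).contains c then
                (PySem.Dict.getD (PySem.Dict.mk (PySem.Dict.getD (PySem.Dict.mk p'.2) c [])) kind' []).map fun x => ((p'.1, q'.1, kind'), x)
              else [])) else []) else []) else []) := by
    refine List.flatMap_congr (fun p' _ => ?_)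
    rw [← flatMap_if]
    refine List.flatMap_congr (fun q' _ => ?_)
    rw [← flatMap_if, ← flatMap_if]
    refine List.flatMap_congr (fun kind' _ => ?_)
    rw [← flatMap_if, ← flatMap_if, ← flatMap_if]
    refine List.flatMap_congr (fun c _ => hinner p' q' kind' c)
  rw [hout, pvPick s2c h1 p hp, pvPick corr h2 q hq]
  rcases hk with rfl | rfl
  · rw [show ((["genes", "groups"] : List String).flatMap fun kind' =>
        if kind' = "genes" then
          (PySem.Dict.getD (PySem.Dict.mk q.2) p.1 []).flatMap fun c =>
            if !(c == "") && (PySem.Dict.mk p.2).contains c then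
              (PySem.Dict.getD (PySem.Dict.mk (PySem.Dict.getD (PySem.Dict.mk p.2) c [])) kind' []).map fun x => ((p.1, q.1, kind'), x)
            else []
        else [])
      = ((PySem.Dict.getD (PySem.Dict.mk q.2) p.1 []).flatMap fun c =>
            if !(c == "") && (PySem.Dict.mk p.2).contains c then
              (PySem.Dict.getD (PySem.Dict.mk (PySem.Dict.getD (PySem.Dict.mk p.2) c [])) "genes" []).map fun x => ((p.1, q.1, "genes"), x)
            else []) from by simp]
    simp only [List.map_flatMap]
    refine List.flatMap_congr (fun c _ => ?_)
    split <;> simp [Function.comp_def]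
  · rw [show ((["genes", "groups"] : List String).flatMap fun kind' =>
        if kind' = "groups" then
          (PySem.Dict.getD (PySem.Dict.mk q.2) p.1 []).flatMap fun c =>
            if !(c == "") && (PySem.Dict.mk p.2).contains c then
              (PySem.Dict.getD (PySem.Dict.mk (PySem.Dict.getD (PySem.Dict.mk p.2) c [])) kind' []).map fun x => ((p.1, q.1, kind'), x)
            else []
        else [])
      = ((PySem.Dict.getD (PySem.Dict.mk q.2) p.1 []).flatMap fun c =>
            if !(c == "") && (PySem.Dict.mk p.2).contains c then
              (PySem.Dict.getD (PySem.Dict.mk (PySem.Dict.getD (PySem.Dict.mk p.2) c [])) "groups" []).map fun x => ((p.1, q.1, "groups"), x)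
            else []) from by simp]
    simp only [List.map_flatMap]
    refine List.flatMap_congr (fun c _ => ?_)
    split <;> simp [Function.comp_def]

-- ===== VERDICT (by name: the statement is the Claim_ definition above) =====
theorem convert_to_tissues_spec : Claim_equal_convert_to_tissues := by
  intro s2c corr _dom pre
  obtain ⟨h1, h2, -⟩ := pre
  unfold Spec_convert_to_tissues convert_to_tissues convert_to_tissues_alt
  rw [PySem.Dict.items_foldl_insert_fresh s2c (fun p => p.1) _ _
        (fun a _ => PySem.Dict.contains_empty _) h1,
      show (PySem.Dict.empty : PySem.Dict String (PySem.Dict String (PySem.Dict String (PySem.Set String)))).items = [] from rfl,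
      List.nil_append, List.map_map]
  refine List.map_congr_left (fun p hp => ?_)
  simp only [Function.comp_def]
  refine congrArg (Prod.mk _) ?_
  rw [PySem.Dict.items_foldl_insert_fresh corr (fun q => q.1) _ _
        (fun a _ => PySem.Dict.contains_empty _) h2,
      show (PySem.Dict.empty : PySem.Dict String (PySem.Dict String (PySem.Set String))).items = [] from rfl,
      List.nil_append, List.map_map]
  refine List.map_congr_left (fun q hq => ?_)
  simp only [Function.comp_def]
  refine congrArg (Prod.mk _) ?_
  simp only [List.foldl_cons, List.foldl_nil, List.map_cons, List.map_nil]
  rw [kind_items, set_loop_eq, set_loop_eq,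
      filter_records s2c corr h1 h2 p hp q hq "genes" (Or.inl rfl),
      filter_records s2c corr h1 h2 p hp q hq "groups" (Or.inr rfl)]
  rfl
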